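-- pv_equiv track=rewrite | github.com/riturajkaushik/self-learning-tic-tac-toe | tic_tac_toe.py | inverse_transform_action
-- ===== SOURCE A (Python) =====
-- def inverse_transform_action(action, rotate_right, flip):
--
--     rotate_right = 4 - rotate_right
--     while rotate_right > 0:
--         rotate_right = rotate_right - 1
--         if action == 1:
--             action = 5
--         elif action == 5:
--             action = 7
--         elif action == 7:
--             action = 3
--         elif action == 3:
--             action = 1
--         elif action == 0:
--             action = 2
--         elif action == 2:
--             action = 8
--         elif action == 8:
--             action = 6
--         elif action == 6:
--             action = 0
--
--     if flip == 1:
--         if action == 0: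
--             action = 2
--         elif action == 3:
--             action = 5
--         elif action == 6:
--             action = 8
--         elif action == 2:
--             action = 0
--         elif action == 5:
--             action = 3
--         elif action == 8:
--             action = 6
--
--     return action
-- ===== SOURCE B (Python) =====
-- def inverse_transform_action(action, rotate_right, flip):
--     # any action outside the 3x3 board (0..8) is left unchanged, as in A
--     if action < 0 or action > 8:
--         return action
--     row, col = divmod(action, 3)
--     n = 4 - rotate_right
--     k = n % 4 if n > 0 else 0       # rotation is 4-periodic
--     if k == 1:
--         row, col = col, 2 - row
--     elif k == 2:
--         row, col = 2 - row, 2 - col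
--     elif k == 3:
--         row, col = 2 - col, row
--     if flip == 1:
--         col = 2 - col
--     return row * 3 + col
-- ===== Notes on version B (the rewrite author's own statement) =====
-- stated objective: simpler
-- what changed: Replaces the per-cell lookup-chain loop (run 4-rotate_right times) by coordinate arithmetic: divmod to (row,col), the rotation count reduced mod 4 and applied as a closed-form case, then a column mirror for flip.
import Mathlib
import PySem

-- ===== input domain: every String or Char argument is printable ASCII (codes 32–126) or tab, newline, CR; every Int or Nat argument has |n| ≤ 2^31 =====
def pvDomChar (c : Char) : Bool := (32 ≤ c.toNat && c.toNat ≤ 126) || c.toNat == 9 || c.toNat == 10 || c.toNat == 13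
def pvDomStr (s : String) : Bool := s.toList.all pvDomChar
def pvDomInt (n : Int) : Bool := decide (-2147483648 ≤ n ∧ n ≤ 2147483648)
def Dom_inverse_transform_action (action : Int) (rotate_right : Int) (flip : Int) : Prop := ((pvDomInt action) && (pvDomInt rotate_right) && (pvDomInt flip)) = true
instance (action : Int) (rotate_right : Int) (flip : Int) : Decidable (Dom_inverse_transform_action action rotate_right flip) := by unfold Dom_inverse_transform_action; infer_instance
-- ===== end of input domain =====

-- B replaces A's per-cell lookup-chain loop by coordinate arithmetic (divmod, rotation count mod 4, closed-form cases): simpler, same values everywhere.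

-- ===== PORT A =====
-- one iteration of A's while-loop body: the two 4-cycles of cells
def pvStepA (action : Int) : Int :=
  if action = 1 then 5
  else if action = 5 then 7
  else if action = 7 then 3
  else if action = 3 then 1
  else if action = 0 then 2
  else if action = 2 then 8
  else if action = 8 then 6
  else if action = 6 then 0
  else action

-- 'while rotate_right > 0: rotate_right -= 1; <chain>'
def pvLoopA (action : Int) (rotate_right : Int) : Int :=
  if h : rotate_right > 0 then pvLoopA (pvStepA action) (rotate_right - 1) else action
termination_by rotate_right.toNat
decreasing_by omega

def inverse_transform_action (action : Int) (rotate_right : Int) (flip : Int) : Int :=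
  let action := pvLoopA action (4 - rotate_right)
  let action :=
    if flip = 1 then
      if action = 0 then 2
      else if action = 3 then 5
      else if action = 6 then 8
      else if action = 2 then 0
      else if action = 5 then 3
      else if action = 8 then 6
      else action
    else action
  action

-- ===== PORT B =====
def inverse_transform_action_alt (action : Int) (rotate_right : Int) (flip : Int) : Int :=
  if action < 0 ∨ action > 8 then action
  else
    let row := PySem.Int.floordiv action 3
    let col := PySem.Int.mod action 3
    let n := 4 - rotate_right
    let k := if n > 0 then PySem.Int.mod n 4 else 0
    let rc : Int × Int :=
      if k = 1 then (col, 2 - row)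
      else if k = 2 then (2 - row, 2 - col)
      else if k = 3 then (2 - col, row)
      else (row, col)
    let rc := if flip = 1 then (rc.1, 2 - rc.2) else rc
    rc.1 * 3 + rc.2

-- ===== PRECONDITION & SPEC =====
def Spec_inverse_transform_action (action : Int) (rotate_right : Int) (flip : Int) (out : Int) : Prop := out = inverse_transform_action_alt action rotate_right flip
instance (action : Int) (rotate_right : Int) (flip : Int) (out : Int) : Decidable (Spec_inverse_transform_action action rotate_right flip out) := by unfold Spec_inverse_transform_action; infer_instance

-- ===== CLAIM (what is proved, stated in full; the proofs are below) =====
def Claim_equal_inverse_transform_action : Prop := ∀ (action : Int) (rotate_right : Int) (flip : Int), Dom_inverse_transform_action action rotate_right flip → Spec_inverse_transform_action action rotate_right flip (inverse_transform_action action rotate_right flip)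

-- ===== LEMMAS AND PROOFS =====

theorem pvLoopA_pos {action rr : Int} (h : rr > 0) :
    pvLoopA action rr = pvLoopA (pvStepA action) (rr - 1) := by
  rw [pvLoopA]; simp [h]

theorem pvLoopA_nonpos {action rr : Int} (h : ¬ rr > 0) : pvLoopA action rr = action := by
  rw [pvLoopA]; simp [h]

-- the cell permutation has order dividing 4
theorem pvStepA_out {a : Int} (h : a < 0 ∨ a > 8) : pvStepA a = a := by
  unfold pvStepA; split_ifs <;> omega

theorem pvStepA_four (a : Int) : pvStepA (pvStepA (pvStepA (pvStepA a))) = a := by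
  by_cases h : a < 0 ∨ a > 8
  · rw [pvStepA_out h, pvStepA_out h, pvStepA_out h, pvStepA_out h]
  · have h0 : 0 ≤ a := by omega
    have h8 : a ≤ 8 := by omega
    interval_cases a <;> rfl

theorem pvLoopA_sub_four {action rr : Int} (h : rr ≥ 4) :
    pvLoopA action rr = pvLoopA action (rr - 4) := by
  rw [pvLoopA_pos (by omega), pvLoopA_pos (by omega), pvLoopA_pos (by omega),
      pvLoopA_pos (by omega)]
  have : rr - 1 - 1 - 1 - 1 = rr - 4 := by omega
  rw [this, pvStepA_four]

theorem pvLoopA_mod_four (action : Int) (rr : Int) (h : 0 ≤ rr) :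
    pvLoopA action rr = pvLoopA action (rr % 4) := by
  obtain ⟨n, rfl⟩ := Int.eq_ofNat_of_zero_le h
  induction n using Nat.strong_induction_on with
  | _ n ih =>
    by_cases h4 : (n : Int) ≥ 4
    · have h1 : (n : Int) - 4 = ((n - 4 : Nat) : Int) := by omega
      have h2 : (n : Int) % 4 = ((n - 4 : Nat) : Int) % 4 := by omega
      rw [pvLoopA_sub_four h4, h1, h2]
      exact ih (n - 4) (by omega) (by omega)
    · have : (n : Int) % 4 = (n : Int) := by omega
      rw [this]

theorem pvLoopA_out {a : Int} (rr : Int) (h : a < 0 ∨ a > 8) : pvLoopA a rr = a := by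
  by_cases hp : rr > 0
  · obtain ⟨n, rfl⟩ := Int.eq_ofNat_of_zero_le (le_of_lt hp)
    clear hp
    induction n with
    | zero => exact pvLoopA_nonpos (by omega)
    | succ m ih =>
      by_cases hm : (m : Int) > 0
      · rw [pvLoopA_pos (by omega), pvStepA_out h]
        have : ((m + 1 : Nat) : Int) - 1 = (m : Int) := by omega
        rw [this]; exact ih
      · rw [pvLoopA_pos (by omega), pvStepA_out h]
        have : ((m + 1 : Nat) : Int) - 1 = (m : Int) := by omega
        rw [this]; exact pvLoopA_nonpos hm
  · exact pvLoopA_nonpos hp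

theorem inverse_transform_action_eq (action rotate_right flip : Int) :
    inverse_transform_action action rotate_right flip
      = inverse_transform_action_alt action rotate_right flip := by
  by_cases hout : action < 0 ∨ action > 8
  · unfold inverse_transform_action inverse_transform_action_alt
    rw [pvLoopA_out _ hout]
    simp only [hout, if_true]
    split_ifs <;> omega
  · have h0 : 0 ≤ action := by omega
    have h8 : action ≤ 8 := by omega
    set rr : Int := 4 - rotate_right with hrr
    by_cases hp : rr > 0
    · have hmod : pvLoopA action rr = pvLoopA action (rr % 4) :=
        pvLoopA_mod_four action rr (by omega)
      have hk : rr % 4 = 0 ∨ rr % 4 = 1 ∨ rr % 4 = 2 ∨ rr % 4 = 3 := by omega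
      unfold inverse_transform_action inverse_transform_action_alt
      rw [← hrr, hmod]
      have hnotout : ¬ (action < 0 ∨ action > 8) := by omega
      simp only [hnotout, if_false, hp, if_true]
      have hm : PySem.Int.mod rr 4 = rr % 4 := PySem.Int.mod_eq_emod_of_pos (by omega)
      rw [hm]
      interval_cases action <;>
        rcases hk with hk | hk | hk | hk <;>
          rw [hk] <;> by_cases hf : flip = 1 <;> simp [hf, pvLoopA, pvStepA, PySem.Int.floordiv, PySem.Int.mod]
    · unfold inverse_transform_action inverse_transform_action_alt
      rw [← hrr, pvLoopA_nonpos hp]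
      have hnotout : ¬ (action < 0 ∨ action > 8) := by omega
      simp only [hnotout, if_false, hp, if_false]
      interval_cases action <;> by_cases hf : flip = 1 <;> simp [hf, PySem.Int.floordiv, PySem.Int.mod]

-- ===== VERDICT (by name: the statement is the Claim_ definition above) =====
theorem inverse_transform_action_spec : Claim_equal_inverse_transform_action := by
  intro action rotate_right flip _
  exact inverse_transform_action_eq action rotate_right flip
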